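-- pv_equiv track=rewrite | github.com/YunseoChoe/AlgorithmPy | 코드트리/CT_예술성.py | get_contact_cnt
-- ===== SOURCE A (Python) =====
-- def in_range(x, y, n):
--     return 0 <= x < n and 0 <= y < n
--
-- def get_contact_cnt(a, b, grouping_board, n):
--     """
--     두 그룹 a, b가 맞닿아 있는 변의 수 계산
--     """
--     dirs = [(-1, 0), (1, 0), (0, -1), (0, 1)]
--     cnt = 0
--
--     for i in range(n):
--         for j in range(n):
--             if grouping_board[i][j] == a: # 한 개의 그룹만 확인.
--                 # 동서남북
--                 for dx, dy in dirs:
--                     nx, ny = i + dx, j + dy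
--                     # 범위 안에 있고 board[nx][ny] 값이 b그룹이라면
--                     if in_range(nx, ny, n) and grouping_board[nx][ny] == b:
--                         cnt += 1
--
--     return cnt
-- ===== SOURCE B (Python) =====
-- def get_contact_cnt(a, b, grouping_board, n):
--     """
--     두 그룹 a, b가 맞닿아 있는 변의 수 계산
--     (edge-centric: each undirected edge visited once, both orientations summed)
--     """
--     cnt = 0
--     for i in range(n):
--         row = grouping_board[i]
--         for j in range(n - 1):
--             u, v = row[j], row[j + 1]
--             cnt += (u == a and v == b) + (u == b and v == a)
--     for i in range(n - 1):
--         row, nrow = grouping_board[i], grouping_board[i + 1]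
--         for j in range(n):
--             u, v = row[j], nrow[j]
--             cnt += (u == a and v == b) + (u == b and v == a)
--     return cnt
-- ===== Notes on version B (the rewrite author's own statement) =====
-- stated objective: alternative
-- what changed: B is edge-centric: it visits each undirected edge once (right and down neighbors only) and adds both orientation checks (u==a and v==b)+(u==b and v==a), instead of A's cell-centric scan of all four directions filtered by source==a.
import Mathlib
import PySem

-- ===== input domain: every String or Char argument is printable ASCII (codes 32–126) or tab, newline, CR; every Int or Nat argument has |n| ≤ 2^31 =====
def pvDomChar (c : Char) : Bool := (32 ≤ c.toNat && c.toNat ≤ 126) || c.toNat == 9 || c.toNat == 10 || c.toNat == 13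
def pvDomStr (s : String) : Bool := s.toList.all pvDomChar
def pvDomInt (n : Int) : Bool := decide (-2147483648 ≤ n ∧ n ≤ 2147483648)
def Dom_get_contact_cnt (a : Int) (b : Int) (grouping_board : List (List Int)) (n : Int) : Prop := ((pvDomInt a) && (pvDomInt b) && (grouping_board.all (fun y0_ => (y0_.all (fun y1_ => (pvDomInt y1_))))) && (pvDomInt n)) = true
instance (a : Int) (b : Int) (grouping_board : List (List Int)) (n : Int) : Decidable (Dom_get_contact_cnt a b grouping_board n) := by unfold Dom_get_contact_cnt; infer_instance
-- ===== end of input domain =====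

-- B counts each undirected edge once (right/down neighbor), summing both orientation checks,
-- instead of A's cell-centric scan of all four directions filtered by source == a.

-- ===== PORT A =====
def in_range (x : Int) (y : Int) (n : Int) : Bool :=
  decide (0 ≤ x ∧ x < n) && decide (0 ≤ y ∧ y < n)

def get_contact_cnt (a : Int) (b : Int) (grouping_board : List (List Int)) (n : Int) : Int :=
  let dirs : List (Int × Int) := [(-1, 0), (1, 0), (0, -1), (0, 1)]
  (PySem.List.pyRange 0 n 1).foldl (fun cnt i =>
    (PySem.List.pyRange 0 n 1).foldl (fun cnt j =>
      if PySem.List.pyGetD (PySem.List.pyGetD grouping_board i []) j 0 == a then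
        dirs.foldl (fun cnt d =>
          let nx := i + d.1
          let ny := j + d.2
          if in_range nx ny n && (PySem.List.pyGetD (PySem.List.pyGetD grouping_board nx []) ny 0 == b) then
            cnt + 1
          else cnt) cnt
      else cnt) cnt) 0

-- ===== PORT B =====
def get_contact_cnt_alt (a : Int) (b : Int) (grouping_board : List (List Int)) (n : Int) : Int :=
  let cnt1 : Int := (PySem.List.pyRange 0 n 1).foldl (fun cnt i =>
    let row := PySem.List.pyGetD grouping_board i []
    (PySem.List.pyRange 0 (n - 1) 1).foldl (fun cnt j =>
      let u := PySem.List.pyGetD row j 0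
      let v := PySem.List.pyGetD row (j + 1) 0
      cnt + ((if u == a && v == b then 1 else 0) + (if u == b && v == a then 1 else 0))) cnt) 0
  (PySem.List.pyRange 0 (n - 1) 1).foldl (fun cnt i =>
    let row := PySem.List.pyGetD grouping_board i []
    let nrow := PySem.List.pyGetD grouping_board (i + 1) []
    (PySem.List.pyRange 0 n 1).foldl (fun cnt j =>
      let u := PySem.List.pyGetD row j 0
      let v := PySem.List.pyGetD nrow j 0
      cnt + ((if u == a && v == b then 1 else 0) + (if u == b && v == a then 1 else 0))) cnt) cnt1

-- ===== PRECONDITION & SPEC =====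
-- Pre_ excludes exactly the inputs where Python A raises IndexError: it reads
-- grouping_board[i][j] for every 0 ≤ i, j < n, so the board must have at least n rows
-- and each of the first n rows at least n entries.
def Pre_get_contact_cnt (a : Int) (b : Int) (grouping_board : List (List Int)) (n : Int) : Prop :=
  n ≤ (grouping_board.length : Int) ∧ ∀ row ∈ grouping_board.take n.toNat, n ≤ (row.length : Int)
instance (a : Int) (b : Int) (grouping_board : List (List Int)) (n : Int) : Decidable (Pre_get_contact_cnt a b grouping_board n) := by unfold Pre_get_contact_cnt; infer_instance

def pvWitness_get_contact_cnt : Int × Int × List (List Int) × Int := (1, 2, [[1, 2], [2, 1]], 2)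

def Spec_get_contact_cnt (a : Int) (b : Int) (grouping_board : List (List Int)) (n : Int) (out : Int) : Prop := out = get_contact_cnt_alt a b grouping_board n
instance (a : Int) (b : Int) (grouping_board : List (List Int)) (n : Int) (out : Int) : Decidable (Spec_get_contact_cnt a b grouping_board n out) := by unfold Spec_get_contact_cnt; infer_instance

-- ===== CLAIM (what is proved, stated in full; the proofs are below) =====
def Claim_equal_get_contact_cnt : Prop := ∀ (a : Int) (b : Int) (grouping_board : List (List Int)) (n : Int), Dom_get_contact_cnt a b grouping_board n → Pre_get_contact_cnt a b grouping_board n → Spec_get_contact_cnt a b grouping_board n (get_contact_cnt a b grouping_board n)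

-- ===== LEMMAS AND PROOFS =====

-- indicator of a symmetric edge check (B's per-edge contribution, Prop form)
def pvE (a b u v : Int) : Int :=
  (if u = a ∧ v = b then 1 else 0) + (if u = b ∧ v = a then 1 else 0)

-- a fold that adds a per-element amount is init + the sum of those amounts
theorem pvFoldlAddMem {α : Type} (l : List α) (F : Int → α → Int) (s : α → Int)
    (h : ∀ acc : Int, ∀ x ∈ l, F acc x = acc + s x) (init : Int) :
    l.foldl F init = init + (l.map s).sum := by
  induction l generalizing init with
  | nil => simp
  | cons x t ih =>
    simp only [List.foldl, List.map, List.sum_cons]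
    rw [h init x (by simp), ih (fun acc y hy => h acc y (by simp [hy]))]
    ring

theorem pvNestedFold (l1 l2 : List Int) (F : Int → Int → Int → Int) (s : Int → Int → Int)
    (h : ∀ i ∈ l1, ∀ acc : Int, ∀ j ∈ l2, F i acc j = acc + s i j) :
    l1.foldl (fun cnt i => l2.foldl (F i) cnt) 0 = (l1.map (fun i => (l2.map (s i)).sum)).sum := by
  rw [pvFoldlAddMem l1 _ (fun i => (l2.map (s i)).sum)
    (fun acc i hi => pvFoldlAddMem l2 (F i) (s i) (fun acc' x hx => h i hi acc' x hx) acc) 0]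
  ring

theorem pvSumRange (s : Nat → Int) (N : Nat) :
    ((List.range N).map s).sum = ∑ i ∈ Finset.range N, s i := by
  induction N with
  | zero => simp
  | succ m ih => simp [List.range_succ, Finset.sum_range_succ, ih]

theorem pvSumPyRange (n : Int) (s : Int → Int) :
    ((PySem.List.pyRange 0 n 1).map s).sum = ∑ k ∈ Finset.range n.toNat, s (k : Int) := by
  rw [PySem.List.pyRange_one]
  simp only [List.map_map, Function.comp_def, zero_add, sub_zero]
  exact pvSumRange (fun k => s (k : Int)) n.toNat

-- shift: the summand vanishes at i = 0
theorem pvShift (s : Nat → Int) (N : Nat) :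
    (∑ i ∈ Finset.range N, if 1 ≤ i then s i else 0) = ∑ i ∈ Finset.range (N - 1), s (i + 1) := by
  cases N with
  | zero => simp
  | succ m =>
    rw [Finset.sum_range_succ']
    simp

-- truncate: the summand vanishes at i = N - 1
theorem pvTrunc (s : Nat → Int) (N : Nat) :
    (∑ i ∈ Finset.range N, if i + 1 < N then s i else 0) = ∑ i ∈ Finset.range (N - 1), s i := by
  cases N with
  | zero => simp
  | succ m =>
    rw [Finset.sum_range_succ]
    simp only [Nat.add_one_lt_add_one_iff, Nat.succ_sub_one, lt_irrefl, if_false, add_zero]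
    exact Finset.sum_congr rfl (fun i hi => by rw [if_pos (by simpa using Finset.mem_range.mp hi)])

-- pull a j-independent condition out of the inner sum
theorem pvPull (p : Prop) [Decidable p] (M : Nat) (q : Nat → Prop) [∀ j, Decidable (q j)] :
    (∑ j ∈ Finset.range M, if p ∧ q j then (1 : Int) else 0)
      = if p then (∑ j ∈ Finset.range M, if q j then (1 : Int) else 0) else 0 := by
  by_cases hp : p <;> simp [hp]

-- A's four-direction inner loop, evaluated to four indicator terms
theorem pvDirsFold (G : Int → Int → Int) (b n i j cnt : Int) :
    ([((-1 : Int), (0 : Int)), (1, 0), (0, -1), (0, 1)]).foldl (fun cnt d =>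
        if in_range (i + d.1) (j + d.2) n && (G (i + d.1) (j + d.2) == b) then cnt + 1 else cnt) cnt
    = cnt + (((if in_range (i - 1) j n ∧ G (i - 1) j = b then (1 : Int) else 0)
        + (if in_range (i + 1) j n ∧ G (i + 1) j = b then 1 else 0))
        + ((if in_range i (j - 1) n ∧ G i (j - 1) = b then 1 else 0)
        + (if in_range i (j + 1) n ∧ G i (j + 1) = b then 1 else 0))) := by
  simp only [List.foldl]
  norm_num [Bool.and_eq_true, beq_iff_eq, sub_eq_add_neg]
  split_ifs <;> ring

-- the cell condition distributes over the four direction indicators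
theorem pvCellSplit (P Q1 Q2 Q3 Q4 : Prop) [Decidable P] [Decidable Q1] [Decidable Q2]
    [Decidable Q3] [Decidable Q4] :
    (if P then (((if Q1 then (1 : Int) else 0) + (if Q2 then 1 else 0))
        + ((if Q3 then 1 else 0) + (if Q4 then 1 else 0))) else 0)
      = (((if Q1 ∧ P then (1 : Int) else 0) + (if Q2 ∧ P then 1 else 0))
        + ((if Q3 ∧ P then 1 else 0) + (if Q4 ∧ P then 1 else 0))) := by
  by_cases hP : P <;> simp [hP]

theorem pvIfIff {P Q : Prop} [Decidable P] [Decidable Q] (h : P ↔ Q) :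
    (if P then (1 : Int) else 0) = if Q then 1 else 0 := by simp [h]

theorem pvAndIf (p q : Prop) [Decidable p] [Decidable q] :
    (if p ∧ q then (1 : Int) else 0) = if p then (if q then (1 : Int) else 0) else 0 := by
  by_cases hp : p <;> simp [hp]

theorem pvPairE (a b u v : Int) :
    (if u = b ∧ v = a then (1 : Int) else 0) + (if v = b ∧ u = a then 1 else 0) = pvE a b u v := by
  unfold pvE
  rw [pvIfIff (and_comm (a := v = b) (b := u = a))]
  ring

-- the grid identity: cell-centric four-direction count = edge-centric count
theorem pvCore (G : Int → Int → Int) (a b : Int) (N : Nat) :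
    (∑ i ∈ Finset.range N, ∑ j ∈ Finset.range N,
        (((if 1 ≤ i ∧ G ((i : Int) - 1) (j : Int) = b ∧ G (i : Int) (j : Int) = a then (1 : Int) else 0)
        + (if i + 1 < N ∧ G ((i : Int) + 1) (j : Int) = b ∧ G (i : Int) (j : Int) = a then 1 else 0))
        + ((if 1 ≤ j ∧ G (i : Int) ((j : Int) - 1) = b ∧ G (i : Int) (j : Int) = a then 1 else 0)
        + (if j + 1 < N ∧ G (i : Int) ((j : Int) + 1) = b ∧ G (i : Int) (j : Int) = a then 1 else 0))))
    = (∑ i ∈ Finset.range N, ∑ j ∈ Finset.range (N - 1), pvE a b (G (i : Int) (j : Int)) (G (i : Int) ((j : Int) + 1)))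
      + (∑ i ∈ Finset.range (N - 1), ∑ j ∈ Finset.range N, pvE a b (G (i : Int) (j : Int)) (G ((i : Int) + 1) (j : Int))) := by
  simp only [Finset.sum_add_distrib]
  -- vertical: up-shift + down-truncate
  have hV1 : (∑ i ∈ Finset.range N, ∑ j ∈ Finset.range N,
        if 1 ≤ i ∧ G ((i : Int) - 1) (j : Int) = b ∧ G (i : Int) (j : Int) = a then (1 : Int) else 0)
      = ∑ i ∈ Finset.range (N - 1), ∑ j ∈ Finset.range N,
        (if G (i : Int) (j : Int) = b ∧ G ((i : Int) + 1) (j : Int) = a then (1 : Int) else 0) := by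
    rw [show (∑ i ∈ Finset.range N, ∑ j ∈ Finset.range N,
        if 1 ≤ i ∧ G ((i : Int) - 1) (j : Int) = b ∧ G (i : Int) (j : Int) = a then (1 : Int) else 0)
      = ∑ i ∈ Finset.range N, (if 1 ≤ i then (∑ j ∈ Finset.range N,
          if G ((i : Int) - 1) (j : Int) = b ∧ G (i : Int) (j : Int) = a then (1 : Int) else 0) else 0)
      from Finset.sum_congr rfl (fun i _ => pvPull _ _ _), pvShift]
    refine Finset.sum_congr rfl (fun i _ => Finset.sum_congr rfl (fun j _ => ?_))
    have e1 : (((i + 1 : Nat) : Int)) - 1 = (i : Int) := by push_cast; ring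
    have e2 : (((i + 1 : Nat) : Int)) = (i : Int) + 1 := by push_cast; ring
    rw [e1, e2]
  have hV2 : (∑ i ∈ Finset.range N, ∑ j ∈ Finset.range N,
        if i + 1 < N ∧ G ((i : Int) + 1) (j : Int) = b ∧ G (i : Int) (j : Int) = a then (1 : Int) else 0)
      = ∑ i ∈ Finset.range (N - 1), ∑ j ∈ Finset.range N,
        (if G ((i : Int) + 1) (j : Int) = b ∧ G (i : Int) (j : Int) = a then (1 : Int) else 0) := by
    rw [show (∑ i ∈ Finset.range N, ∑ j ∈ Finset.range N,
        if i + 1 < N ∧ G ((i : Int) + 1) (j : Int) = b ∧ G (i : Int) (j : Int) = a then (1 : Int) else 0)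
      = ∑ i ∈ Finset.range N, (if i + 1 < N then (∑ j ∈ Finset.range N,
          if G ((i : Int) + 1) (j : Int) = b ∧ G (i : Int) (j : Int) = a then (1 : Int) else 0) else 0)
      from Finset.sum_congr rfl (fun i _ => pvPull _ _ _), pvTrunc]
  -- horizontal: left-shift + right-truncate, inside each row
  have hH1 : (∑ i ∈ Finset.range N, ∑ j ∈ Finset.range N,
        if 1 ≤ j ∧ G (i : Int) ((j : Int) - 1) = b ∧ G (i : Int) (j : Int) = a then (1 : Int) else 0)
      = ∑ i ∈ Finset.range N, ∑ j ∈ Finset.range (N - 1),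
        (if G (i : Int) (j : Int) = b ∧ G (i : Int) ((j : Int) + 1) = a then (1 : Int) else 0) := by
    refine Finset.sum_congr rfl (fun i _ => ?_)
    rw [show (∑ j ∈ Finset.range N,
        if 1 ≤ j ∧ G (i : Int) ((j : Int) - 1) = b ∧ G (i : Int) (j : Int) = a then (1 : Int) else 0)
      = ∑ j ∈ Finset.range N, (if 1 ≤ j then (if G (i : Int) ((j : Int) - 1) = b ∧ G (i : Int) (j : Int) = a then (1 : Int) else 0) else 0)
      from Finset.sum_congr rfl (fun j _ => pvAndIf _ _), pvShift]
    refine Finset.sum_congr rfl (fun j _ => ?_)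
    have e1 : (((j + 1 : Nat) : Int)) - 1 = (j : Int) := by push_cast; ring
    have e2 : (((j + 1 : Nat) : Int)) = (j : Int) + 1 := by push_cast; ring
    rw [e1, e2]
  have hH2 : (∑ i ∈ Finset.range N, ∑ j ∈ Finset.range N,
        if j + 1 < N ∧ G (i : Int) ((j : Int) + 1) = b ∧ G (i : Int) (j : Int) = a then (1 : Int) else 0)
      = ∑ i ∈ Finset.range N, ∑ j ∈ Finset.range (N - 1),
        (if G (i : Int) ((j : Int) + 1) = b ∧ G (i : Int) (j : Int) = a then (1 : Int) else 0) := by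
    refine Finset.sum_congr rfl (fun i _ => ?_)
    rw [show (∑ j ∈ Finset.range N,
        if j + 1 < N ∧ G (i : Int) ((j : Int) + 1) = b ∧ G (i : Int) (j : Int) = a then (1 : Int) else 0)
      = ∑ j ∈ Finset.range N, (if j + 1 < N then (if G (i : Int) ((j : Int) + 1) = b ∧ G (i : Int) (j : Int) = a then (1 : Int) else 0) else 0)
      from Finset.sum_congr rfl (fun j _ => pvAndIf _ _), pvTrunc]
  rw [hV1, hV2, hH1, hH2, ← Finset.sum_add_distrib, ← Finset.sum_add_distrib]
  have hV : (∑ i ∈ Finset.range (N - 1),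
        ((∑ j ∈ Finset.range N, if G (i : Int) (j : Int) = b ∧ G ((i : Int) + 1) (j : Int) = a then (1 : Int) else 0)
        + (∑ j ∈ Finset.range N, if G ((i : Int) + 1) (j : Int) = b ∧ G (i : Int) (j : Int) = a then (1 : Int) else 0)))
      = ∑ i ∈ Finset.range (N - 1), ∑ j ∈ Finset.range N, pvE a b (G (i : Int) (j : Int)) (G ((i : Int) + 1) (j : Int)) :=
    Finset.sum_congr rfl (fun i _ => by
      rw [← Finset.sum_add_distrib]
      exact Finset.sum_congr rfl (fun j _ => pvPairE a b _ _))
  have hH : (∑ i ∈ Finset.range N,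
        ((∑ j ∈ Finset.range (N - 1), if G (i : Int) (j : Int) = b ∧ G (i : Int) ((j : Int) + 1) = a then (1 : Int) else 0)
        + (∑ j ∈ Finset.range (N - 1), if G (i : Int) ((j : Int) + 1) = b ∧ G (i : Int) (j : Int) = a then (1 : Int) else 0)))
      = ∑ i ∈ Finset.range N, ∑ j ∈ Finset.range (N - 1), pvE a b (G (i : Int) (j : Int)) (G (i : Int) ((j : Int) + 1)) :=
    Finset.sum_congr rfl (fun i _ => by
      rw [← Finset.sum_add_distrib]
      exact Finset.sum_congr rfl (fun j _ => pvPairE a b _ _))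
  rw [hV, hH, add_comm]

-- cell value accessor shared by the proof-side restatements of both ports
def pvG (board : List (List Int)) (x y : Int) : Int :=
  PySem.List.pyGetD (PySem.List.pyGetD board x []) y 0

theorem pvEBool (a b u v : Int) :
    ((if u == a && v == b then (1 : Int) else 0) + (if u == b && v == a then 1 else 0))
      = pvE a b u v := by
  simp [pvE, Bool.and_eq_true, beq_iff_eq]

-- A's cell body (guard + four-direction loop) as acc + an indicator sum
theorem pvCellFold (G : Int → Int → Int) (a b n i j acc : Int) :
    (if G i j == a then
        ([((-1 : Int), (0 : Int)), (1, 0), (0, -1), (0, 1)]).foldl (fun cnt d =>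
          if in_range (i + d.1) (j + d.2) n && (G (i + d.1) (j + d.2) == b) then cnt + 1 else cnt) acc
      else acc)
    = acc + (if G i j = a then
        (((if in_range (i - 1) j n ∧ G (i - 1) j = b then (1 : Int) else 0)
        + (if in_range (i + 1) j n ∧ G (i + 1) j = b then 1 else 0))
        + ((if in_range i (j - 1) n ∧ G i (j - 1) = b then 1 else 0)
        + (if in_range i (j + 1) n ∧ G i (j + 1) = b then 1 else 0))) else 0) := by
  by_cases h : G i j = a
  · rw [if_pos (by simpa using h), if_pos h, pvDirsFold]
  · rw [if_neg (by simpa using h), if_neg h, add_zero]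

-- A's double loop as a double Finset sum (stated over an abstract cell accessor G)
theorem pvA_sum (G : Int → Int → Int) (a b n : Int) :
    ((PySem.List.pyRange 0 n 1).foldl (fun cnt i =>
      (PySem.List.pyRange 0 n 1).foldl (fun cnt j =>
        if G i j == a then
          ([((-1 : Int), (0 : Int)), (1, 0), (0, -1), (0, 1)]).foldl (fun cnt d =>
            if in_range (i + d.1) (j + d.2) n && (G (i + d.1) (j + d.2) == b) then cnt + 1 else cnt) cnt
        else cnt) cnt) 0)
    = ∑ i ∈ Finset.range n.toNat, ∑ j ∈ Finset.range n.toNat,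
        (if G (i : Int) (j : Int) = a then
          (((if in_range ((i:Int) - 1) (j:Int) n ∧ G ((i:Int) - 1) (j:Int) = b then (1:Int) else 0)
          + (if in_range ((i:Int) + 1) (j:Int) n ∧ G ((i:Int) + 1) (j:Int) = b then 1 else 0))
          + ((if in_range (i:Int) ((j:Int) - 1) n ∧ G (i:Int) ((j:Int) - 1) = b then 1 else 0)
          + (if in_range (i:Int) ((j:Int) + 1) n ∧ G (i:Int) ((j:Int) + 1) = b then 1 else 0))) else 0) := by
  rw [pvNestedFold (PySem.List.pyRange 0 n 1) (PySem.List.pyRange 0 n 1) _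
    (fun i j => if G i j = a then
      (((if in_range (i - 1) j n ∧ G (i - 1) j = b then (1:Int) else 0)
      + (if in_range (i + 1) j n ∧ G (i + 1) j = b then 1 else 0))
      + ((if in_range i (j - 1) n ∧ G i (j - 1) = b then 1 else 0)
      + (if in_range i (j + 1) n ∧ G i (j + 1) = b then 1 else 0))) else 0)
    (fun i _ acc j _ => pvCellFold G a b n i j acc)]
  rw [pvSumPyRange]
  exact Finset.sum_congr rfl (fun i _ => pvSumPyRange _ _)

-- B's two edge loops as Finset sums (stated over an abstract cell accessor G)
theorem pvB_sum (G : Int → Int → Int) (a b n : Int) :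
    ((PySem.List.pyRange 0 (n - 1) 1).foldl (fun cnt i =>
      (PySem.List.pyRange 0 n 1).foldl (fun cnt j =>
        cnt + ((if G i j == a && G (i + 1) j == b then (1 : Int) else 0)
             + (if G i j == b && G (i + 1) j == a then 1 else 0))) cnt)
      ((PySem.List.pyRange 0 n 1).foldl (fun cnt i =>
        (PySem.List.pyRange 0 (n - 1) 1).foldl (fun cnt j =>
          cnt + ((if G i j == a && G i (j + 1) == b then (1 : Int) else 0)
               + (if G i j == b && G i (j + 1) == a then 1 else 0))) cnt) 0))
    = (∑ i ∈ Finset.range n.toNat, ∑ j ∈ Finset.range (n - 1).toNat,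
          pvE a b (G (i : Int) (j : Int)) (G (i : Int) ((j : Int) + 1)))
      + (∑ i ∈ Finset.range (n - 1).toNat, ∑ j ∈ Finset.range n.toNat,
          pvE a b (G (i : Int) (j : Int)) (G ((i : Int) + 1) (j : Int))) := by
  simp only [PySem.List.foldl_add, pvEBool, zero_add]
  simp only [pvSumPyRange]

-- the main equivalence, unconditional on the Lean side (out-of-range reads default)
theorem pvMain (a b : Int) (board : List (List Int)) (n : Int) :
    get_contact_cnt a b board n = get_contact_cnt_alt a b board n := by
  have hA : get_contact_cnt a b board n =
      ∑ i ∈ Finset.range n.toNat, ∑ j ∈ Finset.range n.toNat,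
        (if pvG board (i : Int) (j : Int) = a then
          (((if in_range ((i:Int) - 1) (j:Int) n ∧ pvG board ((i:Int) - 1) (j:Int) = b then (1:Int) else 0)
          + (if in_range ((i:Int) + 1) (j:Int) n ∧ pvG board ((i:Int) + 1) (j:Int) = b then 1 else 0))
          + ((if in_range (i:Int) ((j:Int) - 1) n ∧ pvG board (i:Int) ((j:Int) - 1) = b then 1 else 0)
          + (if in_range (i:Int) ((j:Int) + 1) n ∧ pvG board (i:Int) ((j:Int) + 1) = b then 1 else 0))) else 0) :=
    pvA_sum (pvG board) a b n
  have hB : get_contact_cnt_alt a b board n =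
      (∑ i ∈ Finset.range n.toNat, ∑ j ∈ Finset.range (n - 1).toNat,
          pvE a b (pvG board (i:Int) (j:Int)) (pvG board (i:Int) ((j:Int) + 1)))
      + (∑ i ∈ Finset.range (n - 1).toNat, ∑ j ∈ Finset.range n.toNat,
          pvE a b (pvG board (i:Int) (j:Int)) (pvG board ((i:Int) + 1) (j:Int))) :=
    pvB_sum (pvG board) a b n
  rcases le_or_gt n 0 with hn | hn
  · have h1 : n.toNat = 0 := by omega
    have h2 : (n - 1).toNat = 0 := by omega
    rw [hA, hB, h1, h2]
    simp
  · have hNn : ((n.toNat : Int)) = n := by omega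
    have hMn : (n - 1).toNat = n.toNat - 1 := by omega
    rw [hA, hB, hMn, ← pvCore (pvG board) a b n.toNat]
    refine Finset.sum_congr rfl (fun i hi => Finset.sum_congr rfl (fun j hj => ?_))
    have hi' := Finset.mem_range.mp hi
    have hj' := Finset.mem_range.mp hj
    rw [pvCellSplit]
    congr 1
    · congr 1
      · exact pvIfIff (by
          unfold in_range
          simp only [Bool.and_eq_true, decide_eq_true_eq]
          constructor
          · rintro ⟨⟨h1, h2⟩, h4⟩; exact ⟨by omega, h2, h4⟩
          · rintro ⟨h1, h2, h3⟩; exact ⟨⟨⟨⟨by omega, by omega⟩, by omega, by omega⟩, h2⟩, h3⟩)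
      · exact pvIfIff (by
          unfold in_range
          simp only [Bool.and_eq_true, decide_eq_true_eq]
          constructor
          · rintro ⟨⟨h1, h2⟩, h4⟩; exact ⟨by omega, h2, h4⟩
          · rintro ⟨h1, h2, h3⟩; exact ⟨⟨⟨⟨by omega, by omega⟩, by omega, by omega⟩, h2⟩, h3⟩)
    · congr 1
      · exact pvIfIff (by
          unfold in_range
          simp only [Bool.and_eq_true, decide_eq_true_eq]
          constructor
          · rintro ⟨⟨h1, h2⟩, h4⟩; exact ⟨by omega, h2, h4⟩
          · rintro ⟨h1, h2, h3⟩; exact ⟨⟨⟨⟨by omega, by omega⟩, by omega, by omega⟩, h2⟩, h3⟩)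
      · exact pvIfIff (by
          unfold in_range
          simp only [Bool.and_eq_true, decide_eq_true_eq]
          constructor
          · rintro ⟨⟨h1, h2⟩, h4⟩; exact ⟨by omega, h2, h4⟩
          · rintro ⟨h1, h2, h3⟩; exact ⟨⟨⟨⟨by omega, by omega⟩, by omega, by omega⟩, h2⟩, h3⟩)

-- ===== VERDICT (by name: the statement is the Claim_ definition above) =====
theorem get_contact_cnt_spec : Claim_equal_get_contact_cnt := by
  intro a b board n _ _
  unfold Spec_get_contact_cnt
  exact pvMain a b board n
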